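-- pv_equiv track=rewrite | github.com/hirokd0627/ielts_ai_trainer | api_server/pronunciation_evaluation_service.py | _align_raw_tokens_by_ref
-- ===== SOURCE A (Python) =====
-- def _align_raw_tokens_by_ref(raw_list, ref_list):
--     ref_idx = 0
--     raw_idx = 0
--     ref_len = len(ref_list)
--     aligned_raw = []
--
--     # Use a copy to avoid modifying the original list.
--     raw_copy = list(raw_list)
--
--     while raw_idx < len(raw_copy) and ref_idx < ref_len:
--         merged_split_done = False
--         for length in range(1, len(raw_copy) + 1):
--             if raw_idx + length > len(raw_copy):
--                 break
--             merged_raw = "".join(raw_copy[raw_idx : raw_idx + length])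
--             ref_word = ref_list[ref_idx]
--
--             if ref_word in merged_raw:
--                 parts = merged_raw.split(ref_word, 1)
--
--                 # Handle prefix part before ref_word
--                 if parts[0]:
--                     aligned_raw.append(parts[0])
--
--                 # Append the matched ref_word
--                 aligned_raw.append(ref_word)
--
--                 # Handle suffix part after ref_word
--                 if parts[1]:
--                     raw_copy[raw_idx] = parts[1]
--                     # Remove the extra merged tokens
--                     for _ in range(1, length):
--                         raw_copy.pop(raw_idx + 1)
--                 else:
--                     # No suffix: remove all merged tokens
--                     for _ in range(length):
--                         raw_copy.pop(raw_idx)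
--
--                 ref_idx += 1
--                 merged_split_done = True
--
--             if merged_split_done:
--                 break
--
--             # If no match after merging all tokens,
--             # align current token directly
--             if length == len(raw_copy):
--                 aligned_raw.append(raw_copy[raw_idx])
--                 raw_idx += 1
--                 ref_idx += 1
--
--     # Append any remaining raw tokens
--     while raw_idx < len(raw_copy):
--         aligned_raw.append(raw_copy[raw_idx])
--         raw_idx += 1
--
--     return aligned_raw
-- ===== SOURCE B (Python) =====
-- def _align_raw_tokens_by_ref(raw_list, ref_list):
--     aligned = []
--     n = len(raw_list)
--     if n:
--         head, i = raw_list[0], 1   # head = current leading token, raw_list[i:] untouched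
--     else:
--         head, i = None, 0
--     for ref_word in ref_list:
--         if head is None:
--             break
--         merged, j = head, i
--         pos = merged.find(ref_word)
--         while pos == -1 and j < n:
--             # only the freshly appended part (plus an overlap window) needs scanning
--             start = len(merged) - len(ref_word) + 1
--             if start < 0:
--                 start = 0
--             merged += raw_list[j]
--             j += 1
--             pos = merged.find(ref_word, start)
--         if pos == -1:
--             # ref_word matches nowhere, even after merging everything: emit head as-is
--             aligned.append(head)
--             head, i = (raw_list[i], i + 1) if i < n else (None, i)
--         else:
--             if pos:
--                 aligned.append(merged[:pos])
--             aligned.append(ref_word)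
--             suffix = merged[pos + len(ref_word):]
--             if suffix:
--                 head, i = suffix, j
--             else:
--                 head, i = (raw_list[j], j + 1) if j < n else (None, j)
--     if head is not None:
--         aligned.append(head)
--         aligned.extend(raw_list[i:])
--     return aligned
-- ===== Notes on version B (the rewrite author's own statement) =====
-- stated objective: alternative
-- what changed: B replaces A's re-joining of list slices and mid-list pops of a mutated working copy by a single incrementally accumulated merge string scanned from an overlap offset, with index pointers into the untouched input list.
import Mathlib
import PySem

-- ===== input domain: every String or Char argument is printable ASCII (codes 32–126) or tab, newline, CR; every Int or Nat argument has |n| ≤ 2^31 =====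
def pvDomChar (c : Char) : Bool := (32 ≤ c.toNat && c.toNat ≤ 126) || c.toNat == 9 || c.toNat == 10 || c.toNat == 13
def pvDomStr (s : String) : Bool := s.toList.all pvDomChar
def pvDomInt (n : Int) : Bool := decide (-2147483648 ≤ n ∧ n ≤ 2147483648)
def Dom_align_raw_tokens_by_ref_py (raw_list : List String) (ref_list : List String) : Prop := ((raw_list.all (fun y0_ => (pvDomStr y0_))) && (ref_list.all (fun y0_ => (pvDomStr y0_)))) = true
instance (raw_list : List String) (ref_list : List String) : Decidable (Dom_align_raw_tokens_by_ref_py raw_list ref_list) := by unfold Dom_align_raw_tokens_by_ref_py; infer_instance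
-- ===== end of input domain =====

-- B replaces A's repeated re-joining of list slices and mid-list pops by an incrementally
-- accumulated merge string (scanned from an overlap offset) and index pointers over the
-- untouched input list; the equivalence is about the return value (A copies its input first,
-- so neither function mutates an argument observably).

-- ===== PORT A =====
-- Strings are handled on the `List Char` side (PySem.Chars are the definitions; PySem.Str
-- functions are thin wrappers over `.toList`), converting once at entry and exit.

-- `for _ in range(...): raw_copy.pop(i)` — pop k times at the same index i.
-- (In A every executed pop has a valid index, so the `.getD xs` default is never used.)
def popTimes (xs : List (List Char)) (i : Int) : Nat → List (List Char)
  | 0 => xs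
  | k + 1 => popTimes (((PySem.List.pop? xs i).map Prod.snd).getD xs) i k

-- The `for length in range(1, len(raw_copy) + 1)` body, step for step.  It carries and
-- returns (aligned, raw_copy, raw_idx, ref_idx); `merged_split_done = True; break` is the
-- return in the match branch.  The `parts` of `merged.split(ref_word, 1)` are read through
-- `splitMax?`, whose `none` case (empty separator = ValueError) is excluded by Pre_ below.
def aInner (ref_list raw_copy : List (List Char)) (raw_idx ref_idx : Nat)
    (aligned : List (List Char)) (length : Nat) :
    List (List Char) × List (List Char) × Nat × Nat :=
  if raw_copy.length + 1 ≤ length then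
    (aligned, raw_copy, raw_idx, ref_idx)          -- range(1, len(raw_copy)+1) exhausted
  else if raw_copy.length < raw_idx + length then
    (aligned, raw_copy, raw_idx, ref_idx)          -- if raw_idx + length > len(raw_copy): break
  else
    let merged := PySem.Chars.join []
      (PySem.List.slice raw_copy (some (raw_idx : Int)) (some ((raw_idx : Int) + (length : Int))))
    let ref_word := PySem.List.pyGetD ref_list (ref_idx : Int) []
    if PySem.Chars.isIn ref_word merged then
      match PySem.Chars.splitMax? merged ref_word 1 with
      | some (p0 :: p1 :: _) =>
        let aligned := if p0 ≠ [] then aligned ++ [p0] else aligned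
        let aligned := aligned ++ [ref_word]
        if p1 ≠ [] then
          (aligned, popTimes (PySem.List.pySetD raw_copy (raw_idx : Int) p1)
            ((raw_idx : Int) + 1) (length - 1), raw_idx, ref_idx + 1)
        else
          (aligned, popTimes raw_copy (raw_idx : Int) length, raw_idx, ref_idx + 1)
      | _ => (aligned, raw_copy, raw_idx, ref_idx)  -- dead: split("") raises, excluded by Pre_
    else if length = raw_copy.length then
      -- no match after merging all tokens: align current token directly, loop continues
      aInner ref_list raw_copy (raw_idx + 1) (ref_idx + 1)
        (aligned ++ [PySem.List.pyGetD raw_copy (raw_idx : Int) []]) (length + 1)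
    else
      aInner ref_list raw_copy raw_idx ref_idx aligned (length + 1)
  termination_by raw_copy.length + 2 - length

-- The outer `while raw_idx < len(raw_copy) and ref_idx < ref_len` loop.  Python's loop has
-- no bound of its own; under Pre_ every iteration increments ref_idx (proved below), so
-- `len(ref_list) + 1` fuel is never exhausted there; the fuel-0 value is the final
-- `while raw_idx < len(raw_copy): aligned.append(...)` tail, which is also the exit value.
def aOuter (ref_list : List (List Char)) (fuel : Nat)
    (aligned raw_copy : List (List Char)) (raw_idx ref_idx : Nat) : List (List Char) :=
  match fuel with
  | 0 => aligned ++ raw_copy.drop raw_idx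
  | fuel + 1 =>
    if raw_idx < raw_copy.length ∧ ref_idx < ref_list.length then
      match aInner ref_list raw_copy raw_idx ref_idx aligned 1 with
      | (aligned', raw_copy', raw_idx', ref_idx') =>
        aOuter ref_list fuel aligned' raw_copy' raw_idx' ref_idx'
    else aligned ++ raw_copy.drop raw_idx

def align_raw_tokens_by_ref_py (raw_list : List String) (ref_list : List String) : List String :=
  (aOuter (ref_list.map String.toList) (ref_list.length + 1) []
    (raw_list.map String.toList) 0 0).map String.ofList

-- ===== PORT B =====
-- the `while pos == -1 and j < n` accumulation loop of Source B
def bInner (raw : List (List Char)) (ref_word merged : List Char) (j : Nat) (pos : Int) :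
    List Char × Nat × Int :=
  if pos = -1 ∧ j < raw.length then
    let start := (merged.length : Int) - (ref_word.length : Int) + 1
    let start := if start < 0 then 0 else start
    let merged' := merged ++ PySem.List.pyGetD raw (j : Int) []
    bInner raw ref_word merged' (j + 1) (PySem.Chars.findFrom merged' ref_word start)
  else (merged, j, pos)
  termination_by raw.length - j

-- the final `if head is not None: aligned.append(head); aligned.extend(raw_list[i:])`
def bFinish (raw : List (List Char)) (head : Option (List Char)) (i : Nat)
    (aligned : List (List Char)) : List (List Char) :=
  match head with
  | none => aligned
  | some h => aligned ++ [h] ++ raw.drop i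

-- the `for ref_word in ref_list` loop (head = None plays Python's None; break = bFinish)
def bOuter (raw : List (List Char)) (refs : List (List Char)) (head : Option (List Char))
    (i : Nat) (aligned : List (List Char)) : List (List Char) :=
  match refs with
  | [] => bFinish raw head i aligned
  | ref_word :: rs =>
    match head with
    | none => bFinish raw none i aligned
    | some h =>
      match bInner raw ref_word h i (PySem.Chars.find h ref_word) with
      | (merged, j, pos) =>
        if pos = -1 then
          let aligned := aligned ++ [h]
          if i < raw.length then
            bOuter raw rs (some (PySem.List.pyGetD raw (i : Int) [])) (i + 1) aligned
          else bOuter raw rs none i aligned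
        else
          let aligned := if pos ≠ 0 then
              aligned ++ [PySem.List.slice merged none (some pos)] else aligned
          let aligned := aligned ++ [ref_word]
          let suffix := PySem.List.slice merged (some (pos + (ref_word.length : Int))) none
          if suffix ≠ [] then bOuter raw rs (some suffix) j aligned
          else if j < raw.length then
            bOuter raw rs (some (PySem.List.pyGetD raw (j : Int) [])) (j + 1) aligned
          else bOuter raw rs none j aligned

def align_raw_tokens_by_ref_py_alt (raw_list : List String) (ref_list : List String) :
    List String :=
  let raw := raw_list.map String.toList
  let hi : Option (List Char) × Nat :=
    if raw.length ≠ 0 then (some (PySem.List.pyGetD raw 0 []), 1) else (none, 0)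
  (bOuter raw (ref_list.map String.toList) hi.1 hi.2 []).map String.ofList

-- ===== PRECONDITION & SPEC =====
-- One step of A's greedy matcher, as a plain recursive specification (NOT a copy of either
-- port: no output, no indices, no fuel): consume the reference word at its first occurrence
-- in the shortest token-prefix of `toks` that contains it; `[]` result from the outer
-- `aTerm` means the word occurs nowhere even after merging everything.
def stepMatchAux (r : List Char) : List Char → List (List Char) → List (List Char)
  | _, [] => []
  | acc, t :: rest =>
    let m := acc ++ t
    if PySem.Chars.isIn r m then
      let suf := m.drop ((PySem.Chars.find m r).toNat + r.length)
      if suf = [] then rest else suf :: rest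
    else stepMatchAux r m rest

-- Pre_ holds exactly where the Python A returns: it excludes only inputs on which A RAISES
-- (ValueError from str.split on an empty reference word reached while raw tokens remain) or
-- LOOPS FOREVER (a second reference word that matches nowhere, while raw tokens remain —
-- after the first such miss A's inner loop can never reach its advancing branch again).
-- `failed` records whether a miss has already happened (A's raw_idx = 1).
def aTerm : List (List Char) → List (List Char) → Bool → Bool
  | [], _, _ => true
  | r :: rs, toks, failed =>
    if toks.isEmpty then true
    else if r.isEmpty then false
    else if PySem.Chars.isIn r toks.flatten then aTerm rs (stepMatchAux r [] toks) failed
    else if failed then false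
    else aTerm rs toks.tail true

def Pre_align_raw_tokens_by_ref_py (raw_list : List String) (ref_list : List String) : Prop :=
  aTerm (ref_list.map String.toList) (raw_list.map String.toList) false = true
instance (raw_list : List String) (ref_list : List String) :
    Decidable (Pre_align_raw_tokens_by_ref_py raw_list ref_list) := by
  unfold Pre_align_raw_tokens_by_ref_py; infer_instance

def pvWitness_align_raw_tokens_by_ref_py : List String × List String :=
  (["hel", "lo", "wor", "ld"], ["hello", "world"])

def Spec_align_raw_tokens_by_ref_py (raw_list : List String) (ref_list : List String)
    (out : List String) : Prop := out = align_raw_tokens_by_ref_py_alt raw_list ref_list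
instance (raw_list : List String) (ref_list : List String) (out : List String) :
    Decidable (Spec_align_raw_tokens_by_ref_py raw_list ref_list out) := by
  unfold Spec_align_raw_tokens_by_ref_py; infer_instance

-- ===== CLAIM (what is proved, stated in full; the proofs are below) =====
def Claim_equal_align_raw_tokens_by_ref_py : Prop := ∀ (raw_list : List String) (ref_list : List String), Dom_align_raw_tokens_by_ref_py raw_list ref_list → Pre_align_raw_tokens_by_ref_py raw_list ref_list → Spec_align_raw_tokens_by_ref_py raw_list ref_list (align_raw_tokens_by_ref_py raw_list ref_list)

-- ===== LEMMAS AND PROOFS =====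

-- ---- generic toolkit ----

theorem pvJoinNil (ps : List (List Char)) : PySem.Chars.join [] ps = ps.flatten := by
  simp only [PySem.Chars.join, List.intercalate]
  induction ps with
  | nil => simp
  | cons p ps ih => cases ps <;> simp_all [List.intersperse]

theorem pvSliceTake (cs : List Char) (p : Int) (h : 0 ≤ p) :
    PySem.List.slice cs none (some p) = cs.take p.toNat := by
  simp [PySem.List.slice, PySem.List.clampIdx]
  rw [if_neg (by omega)]
  simp

theorem pvSliceDrop (cs : List Char) (p : Int) (h : 0 ≤ p) :
    PySem.List.slice cs (some p) none = cs.drop p.toNat := by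
  simp [PySem.List.slice, PySem.List.clampIdx]
  rw [if_neg (by omega)]
  rw [List.take_of_length_le (by simp)]
  rcases Nat.le_total p.toNat cs.length with h' | h'
  · simp [Nat.min_eq_left h']
  · simp [List.drop_of_length_le, h']

theorem pvInfixIffOcc (sub s : List Char) : sub <:+: s ↔ ∃ p, sub <+: s.drop p := by
  rw [← PySem.Chars.isIn_iff_infix, ← PySem.Chars.exists_prefix_drop_iff_isIn]

theorem pvFindFirst {s sub : List Char} (p : Nat) (h1 : sub <+: s.drop p)
    (h2 : ∀ i < p, ¬ sub <+: s.drop i) : PySem.Chars.find s sub = p := by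
  have hin : sub <:+: s := (pvInfixIffOcc sub s).2 ⟨p, h1⟩
  have hnn : 0 ≤ PySem.Chars.find s sub := (PySem.Chars.find_nonneg_iff s sub).2 hin
  obtain ⟨hp, hmin⟩ := PySem.Chars.find_spec hnn
  have : (PySem.Chars.find s sub).toNat = p := by
    rcases Nat.lt_trichotomy (PySem.Chars.find s sub).toNat p with h | h | h
    · exact absurd hp (h2 _ h)
    · exact h
    · exact absurd h1 (hmin p h)
  omega

theorem pvFindNone {s sub : List Char} : PySem.Chars.find s sub = -1 ↔ ∀ p, ¬ sub <+: s.drop p := by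
  rw [PySem.Chars.find_eq_neg_one_iff, pvInfixIffOcc]
  push_neg; rfl

theorem pvOccWindow {m M sub : List Char} (h : m <+: M) {i : Nat} (hoc : sub <+: M.drop i)
    (hlen : i + sub.length ≤ m.length) : sub <+: m.drop i := by
  obtain ⟨rest, rfl⟩ := h
  rw [List.drop_append_of_le_length (by omega)] at hoc
  exact List.prefix_of_prefix_length_le hoc (List.prefix_append _ _) (by simp; omega)

theorem pvFindFromNoLeft {s sub : List Char} (k : Nat) (hk : k ≤ s.length)
    (hno : ∀ p < k, ¬ sub <+: s.drop p) :
    PySem.Chars.findFrom s sub (k : Int) = PySem.Chars.find s sub := by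
  rw [PySem.Chars.findFrom_natCast s sub k hk]
  by_cases hfd : PySem.Chars.find (s.drop k) sub = -1
  · rw [if_pos hfd]
    symm
    rw [pvFindNone] at hfd ⊢
    intro p
    rcases Nat.lt_or_ge p k with h | h
    · exact hno p h
    · have := hfd (p - k)
      rw [List.drop_drop] at this
      rwa [show k + (p - k) = p by omega] at this
  · rw [if_neg hfd]
    have hnn : 0 ≤ PySem.Chars.find (s.drop k) sub := by
      rcases (PySem.Chars.neg_one_le_find (s.drop k) sub).lt_or_eq with h | h
      · omega
      · exact absurd h.symm hfd
    obtain ⟨hp, hmin⟩ := PySem.Chars.find_spec hnn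
    rw [List.drop_drop] at hp
    have : PySem.Chars.find s sub = (k + (PySem.Chars.find (s.drop k) sub).toNat : Nat) := by
      apply pvFindFirst _ hp
      intro i hi
      rcases Nat.lt_or_ge i k with h | h
      · exact hno i h
      · have := hmin (i - k) (by omega)
        rw [List.drop_drop, show k + (i - k) = i by omega] at this
        exact this
    rw [this]; push_cast; omega

-- ---- str.split(sep, 1) at the first occurrence ----

theorem pvGoZero (sep : List Char) (fuel : Nat) (l cur acc : _) (h : 1 ≤ fuel) :
    PySem.Chars.splitOnMax.go sep fuel 0 l cur acc = acc.reverse ++ [cur.reverse ++ l] := by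
  match fuel, l with
  | f+1, [] => simp [PySem.Chars.splitOnMax.go]
  | f+1, c :: rest => simp [PySem.Chars.splitOnMax.go]

theorem pvGoOne (sep : List Char) (hsep : sep ≠ []) :
    ∀ (fuel p : Nat) (l cur acc : _), sep <+: l.drop p → (∀ i < p, ¬ sep <+: l.drop i) →
      p + sep.length < fuel →
      PySem.Chars.splitOnMax.go sep fuel 1 l cur acc =
        acc.reverse ++ [cur.reverse ++ l.take p, l.drop (p + sep.length)] := by
  intro fuel
  induction fuel with
  | zero => intro p l cur acc _ _ hf; omega
  | succ f ih =>
    intro p l cur acc hocc hmin hf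
    match l with
    | [] =>
      exfalso
      simp at hocc
      exact hsep hocc
    | c :: rest =>
      by_cases hpre : sep.isPrefixOf (c :: rest)
      · have hp0 : p = 0 := by
          by_contra hne
          exact hmin 0 (by omega) (by simpa using List.isPrefixOf_iff_prefix.1 hpre)
        subst hp0
        rw [show PySem.Chars.splitOnMax.go sep (f+1) 1 (c :: rest) cur acc
            = PySem.Chars.splitOnMax.go sep f 0 (List.drop sep.length (c :: rest)) [] (cur.reverse :: acc) by
          simp [PySem.Chars.splitOnMax.go, hpre]]
        have hs1 : 1 ≤ sep.length := List.length_pos_iff.2 hsep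
        rw [pvGoZero sep f _ _ _ (by omega)]
        simp
      · have hp0 : p ≠ 0 := by
          intro h0; subst h0
          simp at hocc
          exact hpre (List.isPrefixOf_iff_prefix.2 hocc)
        rw [show PySem.Chars.splitOnMax.go sep (f+1) 1 (c :: rest) cur acc
            = PySem.Chars.splitOnMax.go sep f 1 rest (c :: cur) acc by
          simp [PySem.Chars.splitOnMax.go, hpre]]
        rw [ih (p-1) rest (c :: cur) acc ?_ ?_ (by omega)]
        · simp
          constructor
          · rw [show p = (p-1)+1 by omega]
            simp
          · rw [show p + sep.length = (p - 1 + sep.length) + 1 by omega]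
            simp
        · rw [show List.drop (p-1) rest = List.drop p (c :: rest) by
            rw [show p = (p-1)+1 by omega]; simp]
          exact hocc
        · intro i hi
          have := hmin (i+1) (by omega)
          simpa using this

theorem pvSplitFirst {s sep : List Char} (p : Nat) (hsep : sep ≠ [])
    (h1 : sep <+: s.drop p) (h2 : ∀ i < p, ¬ sep <+: s.drop i) :
    PySem.Chars.splitMax? s sep 1 = some [s.take p, s.drop (p + sep.length)] := by
  have hlen : p + sep.length ≤ s.length := by
    have := h1.length_le
    simp at this
    rcases Nat.le_total p s.length with h | h
    · omega
    · rw [List.drop_eq_nil_of_le h] at h1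
      exact absurd (List.prefix_nil.1 h1) hsep
  rw [PySem.Chars.splitMax?, if_neg (by simpa [List.isEmpty_iff] using hsep)]
  rw [PySem.Chars.splitOnMax, if_neg (by omega)]
  norm_num
  rw [pvGoOne sep hsep (s.length + 1) p s [] [] h1 h2 (by omega)]
  simp

-- ---- pops and sets around a fixed prefix (raw_idx tokens that A skipped) ----

theorem pvSetAppend (pre : List (List Char)) (c0 v : List Char) (rest : List (List Char)) :
    (pre ++ c0 :: rest).set pre.length v = pre ++ v :: rest := by
  induction pre with
  | nil => simp
  | cons x xs ih => simpa using ih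

theorem pvEraseAppend (pre : List (List Char)) (y : List Char) (rest : List (List Char)) :
    (pre ++ y :: rest).eraseIdx pre.length = pre ++ rest := by
  induction pre with
  | nil => rfl
  | cons x xs ih => simpa using ih

theorem pvPopAppend (pre : List (List Char)) (y : List Char) (rest : List (List Char)) :
    PySem.List.pop? (pre ++ y :: rest) ((pre.length : Nat) : Int) = some (y, pre ++ rest) := by
  have heq := PySem.List.pop?_natCast (pre ++ y :: rest) pre.length (by simp)
  rw [heq, pvEraseAppend]
  congr 1
  refine Prod.ext ?_ rfl
  simp [List.getElem_append_right (Nat.le_refl pre.length)]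

theorem pvPopPre (pre : List (List Char)) :
    ∀ (k : Nat) (ys : List (List Char)), k ≤ ys.length →
    popTimes (pre ++ ys) ((pre.length : Nat) : Int) k = pre ++ ys.drop k := by
  intro k
  induction k with
  | zero => intro ys _; simp [popTimes]
  | succ k ih =>
    intro ys hk
    match ys with
    | y :: rest =>
      rw [popTimes, pvPopAppend]
      simpa using ih rest (by simpa using hk)

theorem pvPopPreSucc (pre : List (List Char)) (x : List Char) (ys : List (List Char))
    (k : Nat) (hk : k ≤ ys.length) :
    popTimes (pre ++ x :: ys) (((pre.length : Nat) : Int) + 1) k = pre ++ x :: ys.drop k := by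
  have h := pvPopPre (pre ++ [x]) k ys hk
  simp only [List.append_assoc, List.singleton_append, List.length_append,
    List.length_singleton] at h
  rw [show (((pre.length : Nat) : Int) + 1) = (((pre.length + 1 : Nat)) : Int) by push_cast; ring]
  exact h

-- ---- characterization of A's inner for-loop ----

theorem pvFlatTakePrefix (rc : List (List Char)) (l : Nat) : (rc.take l).flatten <+: rc.flatten :=
  ⟨(rc.drop l).flatten, by rw [← List.flatten_append, List.take_append_drop]⟩

theorem pvAInnerMatch (ref_list pre toks : List (List Char)) (ref_idx : Nat)
    (aligned : List (List Char)) (r : List Char)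
    (hrw : PySem.List.pyGetD ref_list (ref_idx : Int) [] = r) (hr : r ≠ [])
    (L : Nat) (hL1 : 1 ≤ L) (hLle : L ≤ toks.length)
    (hocc : r <:+: (toks.take L).flatten)
    (hmin : ∀ l < L, ¬ r <:+: (toks.take l).flatten) :
    aInner ref_list (pre ++ toks) pre.length ref_idx aligned 1 =
      ((if ((toks.take L).flatten).take (PySem.Chars.find ((toks.take L).flatten) r).toNat ≠ []
          then aligned ++ [((toks.take L).flatten).take (PySem.Chars.find ((toks.take L).flatten) r).toNat]
          else aligned) ++ [r],
       pre ++ (if ((toks.take L).flatten).drop ((PySem.Chars.find ((toks.take L).flatten) r).toNat + r.length) ≠ []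
          then ((toks.take L).flatten).drop ((PySem.Chars.find ((toks.take L).flatten) r).toNat + r.length) :: toks.drop L
          else toks.drop L), pre.length, ref_idx + 1) := by
  have key : ∀ d length, length + d = L → 1 ≤ length →
      aInner ref_list (pre ++ toks) pre.length ref_idx aligned length =
      ((if ((toks.take L).flatten).take (PySem.Chars.find ((toks.take L).flatten) r).toNat ≠ []
          then aligned ++ [((toks.take L).flatten).take (PySem.Chars.find ((toks.take L).flatten) r).toNat]
          else aligned) ++ [r],
       pre ++ (if ((toks.take L).flatten).drop ((PySem.Chars.find ((toks.take L).flatten) r).toNat + r.length) ≠ []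
          then ((toks.take L).flatten).drop ((PySem.Chars.find ((toks.take L).flatten) r).toNat + r.length) :: toks.drop L
          else toks.drop L), pre.length, ref_idx + 1) := by
    intro d
    induction d with
    | zero =>
      intro length hlen h1
      have hlL : length = L := by omega
      subst hlL
      rw [aInner, if_neg (by simp; omega), if_neg (by simp; omega)]
      simp only [PySem.List.slice_natCast_add, List.drop_left, pvJoinNil, hrw]
      set merged := (toks.take length).flatten with hm
      rw [if_pos (by rw [PySem.Chars.isIn_iff_infix]; exact hocc)]
      have hnn : 0 ≤ PySem.Chars.find merged r := (PySem.Chars.find_nonneg_iff merged r).2 hocc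
      obtain ⟨hp, hmn⟩ := PySem.Chars.find_spec hnn
      rw [pvSplitFirst (PySem.Chars.find merged r).toNat hr hp hmn]
      simp only []
      by_cases hsuf : merged.drop ((PySem.Chars.find merged r).toNat + r.length) ≠ []
      · rw [if_pos hsuf, if_pos hsuf]
        obtain ⟨c0, rest, rfl⟩ : ∃ c0 rest, toks = c0 :: rest := by
          cases toks with
          | nil => simp at hLle; omega
          | cons a b => exact ⟨a, b, rfl⟩
        rw [show PySem.List.pySetD (pre ++ c0 :: rest) ((pre.length : Nat) : Int)
              (merged.drop ((PySem.Chars.find merged r).toNat + r.length))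
            = pre ++ (merged.drop ((PySem.Chars.find merged r).toNat + r.length)) :: rest by
          rw [PySem.List.pySetD_natCast, pvSetAppend]]
        rw [pvPopPreSucc pre _ rest (length - 1) (by simp at hLle ⊢; omega)]
        rw [show List.drop length (c0 :: rest) = List.drop (length - 1) rest by
          conv_lhs => rw [show length = (length - 1) + 1 by omega]
          rw [List.drop_succ_cons]]
      · rw [if_neg hsuf, if_neg hsuf]
        rw [pvPopPre pre length toks (by omega)]
    | succ d ih =>
      intro length hlen h1
      rw [aInner, if_neg (by simp; omega), if_neg (by simp; omega)]
      simp only [PySem.List.slice_natCast_add, List.drop_left, pvJoinNil, hrw]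
      rw [if_neg (by
        rw [PySem.Chars.isIn_iff_infix]
        exact hmin length (by omega))]
      rw [if_neg (by simp; omega)]
      exact ih (length + 1) (by omega) (by omega)
  exact key (L - 1) 1 (by omega) (by omega)

theorem pvAInnerNoMatch (ref_list raw_copy : List (List Char)) (ref_idx : Nat)
    (aligned : List (List Char)) (r : List Char)
    (hrw : PySem.List.pyGetD ref_list (ref_idx : Int) [] = r)
    (hne : raw_copy ≠ []) (hno : ¬ r <:+: raw_copy.flatten) :
    aInner ref_list raw_copy 0 ref_idx aligned 1 =
      (aligned ++ [PySem.List.pyGetD raw_copy ((0 : Nat) : Int) []], raw_copy, 1, ref_idx + 1) := by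
  have hlen1 : 1 ≤ raw_copy.length := List.length_pos_iff.2 hne
  have hnol : ∀ l, ¬ r <:+: (raw_copy.take l).flatten := by
    intro l hc
    exact hno (hc.trans (pvFlatTakePrefix raw_copy l).isInfix)
  have hslice : ∀ length : Nat, PySem.List.slice raw_copy (some ((0:Nat) : Int))
      (some (((0:Nat) : Int) + (length : Int))) = raw_copy.take length := by
    intro length
    simpa using PySem.List.slice_natCast_add raw_copy 0 length
  have key : ∀ d length, length + d = raw_copy.length → 1 ≤ length →
      aInner ref_list raw_copy 0 ref_idx aligned length =
      (aligned ++ [PySem.List.pyGetD raw_copy ((0 : Nat) : Int) []], raw_copy, 1, ref_idx + 1) := by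
    intro d
    induction d with
    | zero =>
      intro length hlend h1
      rw [aInner, if_neg (by omega), if_neg (by omega)]
      simp only [hslice, pvJoinNil, hrw]
      rw [if_neg (by rw [PySem.Chars.isIn_iff_infix]; exact hnol length)]
      rw [if_pos (by omega)]
      rw [aInner, if_pos (by omega)]
    | succ d ih =>
      intro length hlend h1
      rw [aInner, if_neg (by omega), if_neg (by omega)]
      simp only [hslice, pvJoinNil, hrw]
      rw [if_neg (by rw [PySem.Chars.isIn_iff_infix]; exact hnol length)]
      rw [if_neg (by omega)]
      exact ih (length + 1) (by omega) (by omega)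
  exact key (raw_copy.length - 1) 1 (by omega) (by omega)

-- ---- characterization of B's inner while-loop ----

theorem pvStartFindFrom (m t r : List Char) (hfind : PySem.Chars.find m r = -1) :
    PySem.Chars.findFrom (m ++ t) r
      (if ((m.length : Int) - (r.length : Int) + 1) < 0 then 0
       else (m.length : Int) - (r.length : Int) + 1) = PySem.Chars.find (m ++ t) r := by
  have hrne : r ≠ [] := by
    intro h; subst h
    rw [show PySem.Chars.find m [] = 0 from PySem.Chars.find_nil m] at hfind
    omega
  have hr1 : 1 ≤ r.length := List.length_pos_iff.2 hrne
  have hcast : (if ((m.length : Int) - (r.length : Int) + 1) < 0 then 0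
       else (m.length : Int) - (r.length : Int) + 1) = ((m.length + 1 - r.length : Nat) : Int) := by
    push_cast; omega
  rw [hcast]
  apply pvFindFromNoLeft _ (by simp; omega)
  intro p hp hocc
  exact (pvFindNone.1 hfind) p (pvOccWindow (List.prefix_append m t) hocc (by omega))

theorem pvBInnerStop (raw : List (List Char)) (r m : List Char) (j : Nat) (pos : Int)
    (h : pos ≠ -1) : bInner raw r m j pos = (m, j, pos) := by
  rw [bInner]; simp [h]

theorem pvBInnerNoFind (raw : List (List Char)) (r : List Char) :
    ∀ (j : Nat) (m : List Char), j ≤ raw.length → ¬ r <:+: m ++ (raw.drop j).flatten →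
    bInner raw r m j (-1) = (m ++ (raw.drop j).flatten, raw.length, -1) := by
  intro j m hj hno
  obtain ⟨d, hd⟩ : ∃ d, raw.length - j = d := ⟨_, rfl⟩
  induction d generalizing j m with
  | zero =>
    have hj' : j = raw.length := by omega
    subst hj'
    rw [bInner]
    simp
  | succ d ih =>
    have hjlt : j < raw.length := by omega
    rw [bInner, if_pos ⟨rfl, hjlt⟩]
    have hget : PySem.List.pyGetD raw (j : Int) [] = raw[j] := by
      simp [List.getD_eq_getElem?_getD, List.getElem?_eq_getElem hjlt]
    have hdropj : raw.drop j = raw[j] :: raw.drop (j+1) := List.drop_eq_getElem_cons hjlt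
    have hpreffull : (m ++ PySem.List.pyGetD raw (j:Int) []) <+: m ++ (List.drop j raw).flatten :=
      ⟨(List.drop (j+1) raw).flatten, by rw [List.append_assoc, hget, hdropj, List.flatten_cons]⟩
    have hfindm : PySem.Chars.find m r = -1 := by
      rw [pvFindNone]
      intro p hocc
      exact hno ((hocc.isInfix.trans (List.drop_suffix p m).isInfix).trans
        ((List.prefix_append m _).isInfix))
    have hfind : PySem.Chars.find (m ++ PySem.List.pyGetD raw (j:Int) []) r = -1 := by
      rw [pvFindNone]
      intro p hocc
      exact hno ((hocc.isInfix.trans (List.drop_suffix p _).isInfix).trans hpreffull.isInfix)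
    simp only []
    rw [pvStartFindFrom m _ r hfindm, hfind]
    rw [ih (j+1) _ (by omega) (by
      rw [List.append_assoc, hget, ← List.flatten_cons, ← hdropj]
      exact hno) (by omega)]
    rw [List.append_assoc, hget, ← List.flatten_cons, ← hdropj]

theorem pvBInnerFound (raw : List (List Char)) (r : List Char) :
    ∀ (K j : Nat) (m : List Char), j + K ≤ raw.length → 1 ≤ K →
      PySem.Chars.find m r = -1 →
      r <:+: m ++ ((raw.drop j).take K).flatten →
      (∀ l < K, ¬ r <:+: m ++ ((raw.drop j).take l).flatten) →
    bInner raw r m j (-1) =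
      (m ++ ((raw.drop j).take K).flatten, j + K,
        PySem.Chars.find (m ++ ((raw.drop j).take K).flatten) r) := by
  intro K
  induction K with
  | zero => omega
  | succ K ih =>
    intro j m hjK hK1 hfindm hocc hmin
    have hjlt : j < raw.length := by omega
    rw [bInner, if_pos ⟨rfl, hjlt⟩]
    simp only []
    have hget : PySem.List.pyGetD raw (j : Int) [] = raw[j] := by
      simp [List.getD_eq_getElem?_getD, List.getElem?_eq_getElem hjlt]
    have hdropj : raw.drop j = raw[j] :: raw.drop (j+1) := List.drop_eq_getElem_cons hjlt
    have htake1 : ((raw.drop j).take 1).flatten = raw[j] := by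
      rw [hdropj, show List.take 1 (raw[j] :: List.drop (j+1) raw) = [raw[j]] from rfl,
        List.flatten_cons, List.flatten_nil, List.append_nil]
    have hstep : ∀ l : Nat, m ++ PySem.List.pyGetD raw (j:Int) [] ++ ((raw.drop (j+1)).take l).flatten
        = m ++ ((raw.drop j).take (l+1)).flatten := by
      intro l
      conv_rhs => rw [hdropj]
      rw [hget, List.take_succ_cons, List.flatten_cons, List.append_assoc]
    rw [pvStartFindFrom m _ r hfindm]
    rcases Nat.eq_or_lt_of_le hK1 with h1 | h1
    · -- K + 1 = 1 : the appended token already contains r; the loop stops here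
      have hK0 : K = 0 := by omega
      subst hK0
      simp only [Nat.zero_add] at hocc ⊢
      have hoccm : r <:+: m ++ PySem.List.pyGetD raw (j:Int) [] := by
        rw [hget, ← htake1]; exact hocc
      have hfd : PySem.Chars.find (m ++ PySem.List.pyGetD raw (j:Int) []) r ≠ -1 := by
        have := (PySem.Chars.find_nonneg_iff (m ++ PySem.List.pyGetD raw (j:Int) []) r).2 hoccm
        omega
      rw [pvBInnerStop raw r _ _ _ hfd]
      rw [hget, ← htake1]
    · -- K + 1 ≥ 2 : the appended token is not enough yet; recurse
      have hno1 : ¬ r <:+: m ++ PySem.List.pyGetD raw (j:Int) [] := by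
        have := hmin 1 (by omega)
        rw [hget, ← htake1]
        exact this
      have hfd : PySem.Chars.find (m ++ PySem.List.pyGetD raw (j:Int) []) r = -1 := by
        rcases (PySem.Chars.neg_one_le_find (m ++ PySem.List.pyGetD raw (j:Int) []) r).lt_or_eq with h | h
        · exfalso
          exact hno1 ((PySem.Chars.find_nonneg_iff _ r).1 (by omega))
        · exact h.symm
      rw [hfd]
      rw [ih (j+1) _ (by omega) (by omega) hfd (by rw [hstep]; exact hocc)
        (by intro l hl; rw [hstep]; exact hmin (l+1) (by omega))]
      rw [hstep K]
      have hnum : j + 1 + K = j + (K + 1) := by omega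
      rw [hnum]

theorem pvStepSyncNone (raw : List (List Char)) (h : List Char) (i : Nat) (hi : i ≤ raw.length)
    (r : List Char) (hnin : ¬ r <:+: (h :: raw.drop i).flatten) :
    bInner raw r h i (PySem.Chars.find h r) = ((h :: raw.drop i).flatten, raw.length, -1) := by
  have hflat : (h :: raw.drop i).flatten = h ++ (raw.drop i).flatten := List.flatten_cons ..
  have hfind : PySem.Chars.find h r = -1 := by
    rw [pvFindNone]
    intro p hocc
    exact hnin ((hocc.isInfix.trans (List.drop_suffix p h).isInfix).trans
      (by rw [hflat]; exact (List.prefix_append h _).isInfix))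
  rw [hfind, pvBInnerNoFind raw r i h hi (by rw [← hflat]; exact hnin), ← hflat]

theorem pvStepSync (raw : List (List Char)) (h : List Char) (i : Nat) (hi : i ≤ raw.length)
    (r : List Char) (hr : r ≠ []) (hin : r <:+: (h :: raw.drop i).flatten) :
    ∃ L, 1 ≤ L ∧ L ≤ (h :: raw.drop i).length ∧
      r <:+: ((h :: raw.drop i).take L).flatten ∧
      (∀ l < L, ¬ r <:+: ((h :: raw.drop i).take l).flatten) ∧
      bInner raw r h i (PySem.Chars.find h r) =
        (((h :: raw.drop i).take L).flatten, i + (L - 1),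
          PySem.Chars.find (((h :: raw.drop i).take L).flatten) r) := by
  have htake : ∀ l : Nat, ((h :: raw.drop i).take (l + 1)).flatten = h ++ ((raw.drop i).take l).flatten := by
    intro l
    rw [List.take_succ_cons, List.flatten_cons]
  have hPex : ∃ l : Nat, r <:+: h ++ ((raw.drop i).take l).flatten :=
    ⟨(raw.drop i).length, by rw [List.take_length]; rwa [List.flatten_cons] at hin⟩
  classical
  let K := Nat.find hPex
  have hK : r <:+: h ++ ((raw.drop i).take K).flatten := Nat.find_spec hPex
  have hKmin : ∀ l < K, ¬ r <:+: h ++ ((raw.drop i).take l).flatten := fun l hl => Nat.find_min hPex hl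
  have hKle : K ≤ (raw.drop i).length := Nat.find_le (by rw [List.take_length]; rwa [List.flatten_cons] at hin)
  refine ⟨K + 1, by omega, by simp only [List.length_cons]; omega, ?_, ?_, ?_⟩
  · rw [htake K]; exact hK
  · intro l hl
    match l with
    | 0 =>
      simp only [List.take_zero, List.flatten_nil]
      intro hcon
      exact hr (List.eq_nil_of_infix_nil hcon)
    | l' + 1 =>
      rw [htake l']
      exact hKmin l' (by omega)
  · rcases Nat.eq_zero_or_pos K with hK0 | hKpos
    · -- r already occurs in h : bInner stops immediately
      have hocc : r <:+: h := by
        have := hK; rw [hK0] at this; simpa using this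
      have hfd : PySem.Chars.find h r ≠ -1 := by
        have := (PySem.Chars.find_nonneg_iff h r).2 hocc
        omega
      rw [pvBInnerStop raw r h i _ hfd, hK0, htake 0]
      simp only [List.take_zero, List.flatten_nil, List.append_nil, Nat.add_sub_cancel,
        Nat.add_zero]
    · have hfd : PySem.Chars.find h r = -1 := by
        have h0 := hKmin 0 hKpos
        simp only [List.take_zero, List.flatten_nil, List.append_nil] at h0
        rcases (PySem.Chars.neg_one_le_find h r).lt_or_eq with hlt | heq
        · exact absurd ((PySem.Chars.find_nonneg_iff h r).1 (by omega)) h0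
        · exact heq.symm
      rw [hfd, pvBInnerFound raw r K i h (by rw [List.length_drop] at hKle; omega) hKpos hfd hK hKmin, htake K]
      simp only [Nat.add_sub_cancel]

-- ---- the greedy-step specification agrees with the minimal-window characterization ----

theorem pvStepMatchEq (r : List Char) :
    ∀ (toks : List (List Char)) (acc : List Char) (L : Nat), 1 ≤ L → L ≤ toks.length →
      r <:+: acc ++ (toks.take L).flatten →
      (∀ l < L, ¬ r <:+: acc ++ (toks.take l).flatten) →
      stepMatchAux r acc toks =
        (if (acc ++ (toks.take L).flatten).drop
              ((PySem.Chars.find (acc ++ (toks.take L).flatten) r).toNat + r.length) = []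
          then toks.drop L
          else (acc ++ (toks.take L).flatten).drop
              ((PySem.Chars.find (acc ++ (toks.take L).flatten) r).toNat + r.length) :: toks.drop L) := by
  intro toks
  induction toks with
  | nil => intro acc L h1 hle; simp at hle; omega
  | cons t rest ih =>
    intro acc L h1 hle hocc hmin
    have htake1 : ((t :: rest).take 1).flatten = t := by simp
    rcases Nat.eq_or_lt_of_le h1 with hL1 | hL2
    · -- L = 1
      subst hL1
      rw [stepMatchAux]
      rw [htake1] at hocc ⊢
      rw [if_pos (by rw [PySem.Chars.isIn_iff_infix]; exact hocc)]
      simp only [List.drop_succ_cons, List.drop_zero]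
    · -- 2 ≤ L
      have hno1 : ¬ r <:+: acc ++ t := by
        have := hmin 1 (by omega)
        rwa [htake1] at this
      rw [stepMatchAux]
      rw [if_neg (by rw [PySem.Chars.isIn_iff_infix]; exact hno1)]
      have hstep : ∀ l : Nat, (acc ++ t) ++ (rest.take l).flatten = acc ++ ((t :: rest).take (l + 1)).flatten := by
        intro l
        rw [List.take_succ_cons, List.flatten_cons, List.append_assoc]
      have := ih (acc ++ t) (L - 1) (by omega) (by simp at hle; omega)
        (by rw [hstep, show L - 1 + 1 = L by omega]; exact hocc)
        (by intro l hl; rw [hstep]; exact hmin (l + 1) (by omega))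
      rw [this, hstep (L - 1), show L - 1 + 1 = L by omega]
      have hdrop : rest.drop (L - 1) = (t :: rest).drop L := by
        conv_rhs => rw [show L = (L - 1) + 1 by omega]
        rw [List.drop_succ_cons]
      rw [hdrop]

-- ---- trivial exits ----

theorem pvAOuterStop (ref_list : List (List Char)) (fuel : Nat)
    (aligned raw_copy : List (List Char)) (raw_idx ref_idx : Nat)
    (h : ¬ (raw_idx < raw_copy.length ∧ ref_idx < ref_list.length)) :
    aOuter ref_list fuel aligned raw_copy raw_idx ref_idx = aligned ++ raw_copy.drop raw_idx := by
  cases fuel with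
  | zero => rfl
  | succ f => rw [aOuter, if_neg h]

theorem pvBOuterNone (raw refs : List (List Char)) (i : Nat) (aligned : List (List Char)) :
    bOuter raw refs none i aligned = aligned := by
  cases refs <;> rfl

-- ---- the main simulation: A's outer loop tracks B's for-loop step for step ----

theorem pvSim (raw ref_list : List (List Char)) :
    ∀ (refs : List (List Char)) (ref_idx : Nat) (h : List Char) (i : Nat)
      (pre aligned : List (List Char)) (fuel : Nat),
      ref_list.drop ref_idx = refs → i ≤ raw.length → refs.length < fuel →
      aTerm refs (h :: raw.drop i) (!pre.isEmpty) = true →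
      aOuter ref_list fuel aligned (pre ++ h :: raw.drop i) pre.length ref_idx
        = bOuter raw refs (some h) i aligned := by
  intro refs
  induction refs with
  | nil =>
    intro ref_idx h i pre aligned fuel hdrop hi hfuel _
    have hlen : ref_list.length ≤ ref_idx := by
      by_contra hc
      have := congrArg List.length hdrop
      simp [List.length_drop] at this
      omega
    rw [pvAOuterStop _ _ _ _ _ _ (by simp; omega)]
    rw [List.drop_left]
    simp [bOuter, bFinish]
  | cons r rs ih =>
    intro ref_idx h i pre aligned fuel hdrop hi hfuel hterm
    obtain ⟨f, rfl⟩ : ∃ f, fuel = f + 1 := ⟨fuel - 1, by omega⟩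
    have hreflt : ref_idx < ref_list.length := by
      have := congrArg List.length hdrop
      simp [List.length_drop] at this
      omega
    have hdrop' : ref_list.drop (ref_idx + 1) = rs := by
      have h2 : (ref_list.drop ref_idx).tail = rs := by rw [hdrop, List.tail_cons]
      rwa [List.tail_drop] at h2
    have hrw : PySem.List.pyGetD ref_list ((ref_idx : Nat) : Int) [] = r := by
      have hge : ref_list[ref_idx]? = some r := by
        rw [← List.head?_drop, hdrop]; rfl
      simp [List.getD_eq_getElem?_getD, hge]
    rw [aTerm] at hterm
    simp only [List.isEmpty_cons, Bool.false_eq_true, if_false] at hterm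
    by_cases hre : r.isEmpty
    · rw [if_pos hre] at hterm; exact absurd hterm (by simp)
    rw [if_neg hre] at hterm
    have hr : r ≠ [] := by simpa [List.isEmpty_iff] using hre
    by_cases hin : PySem.Chars.isIn r (h :: raw.drop i).flatten
    · -- matched step
      rw [if_pos hin] at hterm
      have hin' : r <:+: (h :: raw.drop i).flatten :=
        (PySem.Chars.isIn_iff_infix r (h :: raw.drop i).flatten).1 hin
      obtain ⟨L, hL1, hLle, hocc, hmin, hbin⟩ := pvStepSync raw h i hi r hr hin'
      have hposnn : 0 ≤ PySem.Chars.find (((h :: raw.drop i).take L).flatten) r :=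
        (PySem.Chars.find_nonneg_iff _ r).2 hocc
      have hwne : ((h :: raw.drop i).take L).flatten ≠ [] := by
        intro hc
        rw [hc] at hocc
        exact hr (List.eq_nil_of_infix_nil hocc)
      have hjle : i + (L - 1) ≤ raw.length := by
        simp only [List.length_cons, List.length_drop] at hLle
        omega
      have hdropL : (h :: raw.drop i).drop L = raw.drop (i + (L - 1)) := by
        rw [show L = (L - 1) + 1 by omega, List.drop_succ_cons, List.drop_drop]
        congr 1
        try omega
      -- A's step
      rw [aOuter, if_pos (⟨by simp, hreflt⟩ : _ ∧ _)]
      rw [pvAInnerMatch ref_list pre (h :: raw.drop i) ref_idx aligned r hrw hr L hL1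
        (by simp only [List.length_cons, List.length_drop] at hLle ⊢; omega) hocc hmin]
      -- B's step
      rw [bOuter, hbin]
      dsimp only
      rw [if_neg (show ¬ PySem.Chars.find (((h :: raw.drop i).take L).flatten) r = -1 by omega)]
      have hslice1 : PySem.List.slice (((h :: raw.drop i).take L).flatten) none
          (some (PySem.Chars.find (((h :: raw.drop i).take L).flatten) r))
          = (((h :: raw.drop i).take L).flatten).take
              (PySem.Chars.find (((h :: raw.drop i).take L).flatten) r).toNat :=
        pvSliceTake _ _ hposnn
      have hslice2 : PySem.List.slice (((h :: raw.drop i).take L).flatten)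
          (some (PySem.Chars.find (((h :: raw.drop i).take L).flatten) r + (r.length : Int))) none
          = (((h :: raw.drop i).take L).flatten).drop
              ((PySem.Chars.find (((h :: raw.drop i).take L).flatten) r).toNat + r.length) := by
        rw [pvSliceDrop _ _ (by omega)]
        congr 1
        omega
      have haleq : (if PySem.Chars.find (((h :: raw.drop i).take L).flatten) r ≠ 0 then
            aligned ++ [PySem.List.slice (((h :: raw.drop i).take L).flatten) none
              (some (PySem.Chars.find (((h :: raw.drop i).take L).flatten) r))] else aligned)
          = (if (((h :: raw.drop i).take L).flatten).take
                (PySem.Chars.find (((h :: raw.drop i).take L).flatten) r).toNat ≠ [] then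
              aligned ++ [(((h :: raw.drop i).take L).flatten).take
                (PySem.Chars.find (((h :: raw.drop i).take L).flatten) r).toNat] else aligned) := by
        rw [hslice1]
        by_cases hp0 : PySem.Chars.find (((h :: raw.drop i).take L).flatten) r = 0
        · have ht0 : (PySem.Chars.find (((h :: raw.drop i).take L).flatten) r).toNat = 0 := by
            omega
          rw [if_neg (by simp [hp0]), if_neg (by simp [ht0])]
        · rw [if_pos hp0, if_pos (by
            simp only [ne_eq, List.take_eq_nil_iff, not_or]
            exact ⟨by omega, hwne⟩)]
      rw [haleq, hslice2]
      have hstep : stepMatchAux r [] (h :: raw.drop i) =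
          (if (((h :: raw.drop i).take L).flatten).drop
                ((PySem.Chars.find (((h :: raw.drop i).take L).flatten) r).toNat + r.length) = []
            then (h :: raw.drop i).drop L
            else (((h :: raw.drop i).take L).flatten).drop
                ((PySem.Chars.find (((h :: raw.drop i).take L).flatten) r).toNat + r.length)
              :: (h :: raw.drop i).drop L) := by
        have := pvStepMatchEq r (h :: raw.drop i) [] L hL1 hLle (by simpa using hocc)
          (by intro l hl; simpa using hmin l hl)
        simpa using this
      by_cases hsufne : (((h :: raw.drop i).take L).flatten).drop
          ((PySem.Chars.find (((h :: raw.drop i).take L).flatten) r).toNat + r.length) = []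
      · -- no suffix: the next head is the next untouched raw token (if any)
        rw [if_neg (not_not_intro hsufne), if_neg (not_not_intro hsufne)]
        rw [hdropL]
        have hterm2 : aTerm rs (raw.drop (i + (L - 1))) (!pre.isEmpty) = true := by
          rw [hstep, if_pos hsufne, hdropL] at hterm
          exact hterm
        by_cases hjlt : i + (L - 1) < raw.length
        · rw [if_pos hjlt]
          have hget : PySem.List.pyGetD raw ((i + (L - 1) : Nat) : Int) [] = raw[i + (L - 1)] := by
            rw [PySem.List.pyGetD_natCast]
            simp [List.getD_eq_getElem?_getD, List.getElem?_eq_getElem hjlt]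
          rw [hget]
          have hcons : raw[i + (L - 1)] :: raw.drop (i + (L - 1) + 1) = raw.drop (i + (L - 1)) :=
            (List.drop_eq_getElem_cons hjlt).symm
          have := ih (ref_idx + 1) raw[i + (L - 1)] (i + (L - 1) + 1) pre
            ((if (((h :: raw.drop i).take L).flatten).take (PySem.Chars.find (((h :: raw.drop i).take L).flatten) r).toNat ≠ [] then aligned ++ [(((h :: raw.drop i).take L).flatten).take (PySem.Chars.find (((h :: raw.drop i).take L).flatten) r).toNat] else aligned) ++ [r]) f hdrop'
            (by omega) (by simp at hfuel ⊢; omega) (by rw [hcons]; exact hterm2)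
          rw [← this, hcons]
        · rw [if_neg hjlt]
          have hjeq : i + (L - 1) = raw.length := by omega
          rw [hjeq, List.drop_length]
          rw [pvAOuterStop _ _ _ _ _ _ (by simp)]
          rw [pvBOuterNone]
          simp
      · -- the suffix becomes the new head, at pointer j
        rw [if_pos hsufne, if_pos hsufne]
        have hterm2 : aTerm rs ((((h :: raw.drop i).take L).flatten).drop
              ((PySem.Chars.find (((h :: raw.drop i).take L).flatten) r).toNat + r.length)
            :: raw.drop (i + (L - 1))) (!pre.isEmpty) = true := by
          rw [hstep, if_neg hsufne, hdropL] at hterm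
          exact hterm
        have := ih (ref_idx + 1)
          ((((h :: raw.drop i).take L).flatten).drop
            ((PySem.Chars.find (((h :: raw.drop i).take L).flatten) r).toNat + r.length))
          (i + (L - 1)) pre
          ((if (((h :: raw.drop i).take L).flatten).take (PySem.Chars.find (((h :: raw.drop i).take L).flatten) r).toNat ≠ [] then aligned ++ [(((h :: raw.drop i).take L).flatten).take (PySem.Chars.find (((h :: raw.drop i).take L).flatten) r).toNat] else aligned) ++ [r]) f hdrop' hjle (by simp at hfuel ⊢; omega) hterm2
        rw [← hdropL] at this
        exact this
    · -- unmatched step: only legal with raw_idx = 0 (pre = [])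
      rw [if_neg hin] at hterm
      have hpre : pre = [] := by
        by_cases hp : pre.isEmpty
        · simpa [List.isEmpty_iff] using hp
        · rw [show (!pre.isEmpty) = true by simp [hp], if_pos rfl] at hterm
          exact absurd hterm (by simp)
      subst hpre
      rw [show (!(([] : List (List Char))).isEmpty) = false by simp, if_neg (by simp)] at hterm
      have hin' : ¬ r <:+: (h :: raw.drop i).flatten := by
        rw [← PySem.Chars.isIn_iff_infix]
        simpa using hin
      -- A's step
      rw [aOuter, if_pos (⟨by simp, hreflt⟩ : _ ∧ _)]
      simp only [List.nil_append, List.length_nil]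
      rw [pvAInnerNoMatch ref_list (h :: raw.drop i) ref_idx aligned r hrw (by simp) hin']
      have hget0 : PySem.List.pyGetD (h :: raw.drop i) ((0 : Nat) : Int) [] = h := by simp
      rw [hget0]
      -- B's step
      rw [bOuter]
      rw [pvStepSyncNone raw h i hi r hin']
      dsimp only
      rw [if_pos rfl]
      by_cases hilt : i < raw.length
      · rw [if_pos hilt]
        have hget : PySem.List.pyGetD raw ((i : Nat) : Int) [] = raw[i] := by
          simp [List.getD_eq_getElem?_getD, List.getElem?_eq_getElem hilt]
        rw [hget]
        have hcons : raw[i] :: raw.drop (i + 1) = raw.drop i := (List.drop_eq_getElem_cons hilt).symm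
        have := ih (ref_idx + 1) raw[i] (i + 1) [h] (aligned ++ [h]) f hdrop'
          (by omega) (by simp at hfuel ⊢; omega)
          (by rw [hcons]; simpa using hterm)
        rw [hcons] at this
        simpa using this
      · rw [if_neg hilt]
        have hieq : i = raw.length := by omega
        have hdnil : raw.drop i = [] := by rw [hieq, List.drop_length]
        rw [pvAOuterStop _ _ _ _ _ _ (by simp [hdnil])]
        rw [pvBOuterNone]
        simp [hdnil]

-- ===== VERDICT (by name: the statement is the Claim_ definition above) =====
theorem align_raw_tokens_by_ref_py_spec : Claim_equal_align_raw_tokens_by_ref_py := by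
  intro raw_list ref_list _ hpre
  unfold Spec_align_raw_tokens_by_ref_py
  unfold align_raw_tokens_by_ref_py align_raw_tokens_by_ref_py_alt
  cases raw_list with
  | nil =>
    simp only [List.map_nil]
    rw [pvAOuterStop _ _ _ _ _ _ (by simp)]
    simp [pvBOuterNone]
  | cons t rest =>
    dsimp only [List.map_cons]
    have hsim := pvSim (t.toList :: rest.map String.toList) (ref_list.map String.toList)
      (ref_list.map String.toList) 0 t.toList 1 [] [] (ref_list.length + 1)
      (by simp) (by simp) (by simp) (by simpa using hpre)
    simp only [List.nil_append, List.length_nil, List.drop_succ_cons, List.drop_zero] at hsim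
    rw [if_pos (show (t.toList :: rest.map String.toList).length ≠ 0 by simp)]
    dsimp only
    rw [show PySem.List.pyGetD (t.toList :: rest.map String.toList) 0 [] = t.toList from by simp,
      hsim]
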